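-- pv_equiv track=rewrite | github.com/Antzy21/Nerdle | equation_checks.py | contains_leading_zeros
-- ===== SOURCE A (Python) =====
-- def contains_leading_zeros(func: str):
--     for idx, value in enumerate(func):
--         if value == '0':
--             follows_operation = (idx == 0 or func[idx-1] in ["+","-","*","/","="])
--             precedes_operation = (idx != len(func)-1 and func[idx+1] not in ["+","-","*","/","="])
--             if follows_operation and precedes_operation:
--                 return True
--     return False
-- ===== SOURCE B (Python) =====
-- def contains_leading_zeros(func: str):
--     operators = "+-*/="
--     tokens = []
--     current = ""
--     for ch in func:
--         if ch in operators:
--             tokens.append(current)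
--             current = ""
--         else:
--             current += ch
--     tokens.append(current)
--     return any(len(t) >= 2 and t[0] == '0' for t in tokens)
-- ===== Notes on version B (the rewrite author's own statement) =====
-- stated objective: simpler
-- what changed: B splits the string into operand tokens at the five operator characters and returns True iff some token has length at least two and begins with the zero digit, replacing A's per-character neighbour (idx-1/idx+1) inspection.
import Mathlib
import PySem

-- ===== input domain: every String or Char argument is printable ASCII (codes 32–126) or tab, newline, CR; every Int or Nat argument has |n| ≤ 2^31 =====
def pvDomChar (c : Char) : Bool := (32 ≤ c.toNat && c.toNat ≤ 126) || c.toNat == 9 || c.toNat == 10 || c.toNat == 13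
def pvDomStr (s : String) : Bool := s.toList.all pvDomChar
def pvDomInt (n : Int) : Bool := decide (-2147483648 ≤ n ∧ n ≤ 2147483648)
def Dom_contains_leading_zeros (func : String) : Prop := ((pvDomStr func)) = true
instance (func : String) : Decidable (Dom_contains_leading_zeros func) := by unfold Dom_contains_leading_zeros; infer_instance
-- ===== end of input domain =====

-- B tokenizes on the operator characters and checks each token's first digit, instead of A's per-index neighbour inspection; proved equal on all strings.


-- ===== PORT A =====
def clzOps : List Char := ['+', '-', '*', '/', '=']

-- the 'for idx, value in enumerate(func)' loop with early return, as index recursion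
def clzLoop (cs : List Char) (idx : Nat) : Bool :=
  if h : idx < cs.length then
    let value := cs[idx]
    if value = '0' then
      let follows := (idx == 0) || decide (cs.getD (idx - 1) ' ' ∈ clzOps)
      let precedes := (idx != cs.length - 1) && !(decide (cs.getD (idx + 1) ' ' ∈ clzOps))
      if follows && precedes then true else clzLoop cs (idx + 1)
    else clzLoop cs (idx + 1)
  else false
termination_by cs.length - idx

def contains_leading_zeros (func : String) : Bool := clzLoop func.toList 0

-- ===== PORT B =====
-- Source B's loop: split into tokens at operator characters (carrying 'current'), final 'current' appended
def clzTokens : List Char → List Char → List (List Char)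
  | [], current => [current]
  | ch :: rest, current =>
    if ch ∈ clzOps then current :: clzTokens rest []
    else clzTokens rest (current ++ [ch])

-- 'len(t) >= 2 and t[0] == '0''
def clzPred (t : List Char) : Bool := decide (2 ≤ t.length) && decide (t.getD 0 ' ' = '0')

def contains_leading_zeros_alt (func : String) : Bool :=
  (clzTokens func.toList []).any clzPred

-- ===== PRECONDITION & SPEC =====
def Spec_contains_leading_zeros (func : String) (out : Bool) : Prop := out = contains_leading_zeros_alt func
instance (func : String) (out : Bool) : Decidable (Spec_contains_leading_zeros func out) := by unfold Spec_contains_leading_zeros; infer_instance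

-- ===== CLAIM (what is proved, stated in full; the proofs are below) =====
def Claim_equal_contains_leading_zeros : Prop := ∀ (func : String), Dom_contains_leading_zeros func → Spec_contains_leading_zeros func (contains_leading_zeros func)

-- ===== LEMMAS AND PROOFS =====

-- common intermediate form: one left-to-right scan carrying 'am I at a token start?'
def clzScan : Bool → List Char → Bool
  | _, [] => false
  | st, v :: rest =>
    if v = '0' && st && !rest.isEmpty && !(decide (rest.getD 0 ' ' ∈ clzOps)) then true
    else clzScan (decide (v ∈ clzOps)) rest

def clzStart (pre : List Char) : Bool :=
  match pre.getLast? with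
  | none => true
  | some c => decide (c ∈ clzOps)

lemma clzLoop_eq_scan : ∀ (suf pre : List Char),
    clzLoop (pre ++ suf) pre.length = clzScan (clzStart pre) suf := by
  intro suf
  induction suf with
  | nil =>
      intro pre
      rw [clzLoop]
      simp [clzScan]
  | cons v rest ih =>
      intro pre
      rw [clzLoop]
      have hlen : (pre ++ v :: rest).length = pre.length + (rest.length + 1) := by
        simp [List.length_append]; try omega
      have hlt : pre.length < (pre ++ v :: rest).length := by omega
      have hv : (pre ++ v :: rest)[pre.length]'hlt = v := by
        simp
      have hrec : clzLoop (pre ++ v :: rest) (pre.length + 1)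
          = clzScan (decide (v ∈ clzOps)) rest := by
        have h1 : pre ++ v :: rest = (pre ++ [v]) ++ rest := by simp
        have h2 : pre.length + 1 = (pre ++ [v]).length := by simp
        rw [h1, h2, ih (pre ++ [v])]
        congr 1
        simp [clzStart]
      have hfollow : ((pre.length == 0) || decide ((pre ++ v :: rest).getD (pre.length - 1) ' ' ∈ clzOps))
          = clzStart pre := by
        cases pre using List.reverseRecOn with
        | nil => simp [clzStart]
        | append_singleton p c _ =>
            have hne : (p ++ [c]).length = p.length + 1 := by simp
            have : (p ++ [c] ++ v :: rest).getD (p.length + 1 - 1) ' ' = c := by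
              have : p ++ [c] ++ v :: rest = p ++ c :: (v :: rest) := by simp
              rw [this]
              simp [List.getD]
            simp [clzStart, hne]
      have hnext : (pre ++ v :: rest).getD (pre.length + 1) ' ' = rest.getD 0 ' ' := by
        have : pre ++ v :: rest = (pre ++ [v]) ++ rest := by simp
        rw [this]
        have h2 : (pre ++ [v]).length = pre.length + 1 := by simp
        rw [List.getD_append_right _ _ _ _ (by simp)]
        simp
      have hlast : ((pre.length : Nat) != (pre ++ v :: rest).length - 1) = !rest.isEmpty := by
        cases rest with
        | nil => simp at hlen ⊢; try omega
        | cons a b => simp at hlen ⊢; try omega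
      simp only [hv, dif_pos hlt, hrec, hfollow, hnext, hlast]
      by_cases h0 : v = '0'
      · simp only [h0, clzScan]
        by_cases hst : clzStart pre = true
        · by_cases hre : rest.isEmpty
          · simp_all
          · by_cases hop : (rest.getD 0 ' ' ∈ clzOps)
            · simp_all
            · simp_all
        · simp_all
      · simp [h0, clzScan]

lemma clzTokens_any_eq_scan : ∀ (cs cur : List Char),
    (clzTokens cs cur).any clzPred =
      (if cur = [] then clzScan true cs
       else if cur = ['0'] then clzScan true ('0' :: cs)
       else if clzPred cur then true
       else clzScan false cs) := by
  intro cs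
  induction cs with
  | nil =>
      intro cur
      match cur with
      | [] => simp [clzTokens, clzPred, clzScan]
      | [c] =>
          by_cases h : c = '0' <;>
            simp [clzTokens, clzPred, clzScan, h]
      | a :: b :: t =>
          have : (a :: b :: t) ≠ ['0'] := by simp
          by_cases hp : clzPred (a :: b :: t) = true <;>
            simp [clzTokens, this, hp, clzScan]
  | cons v rest ih =>
      intro cur
      simp only [clzTokens]
      by_cases hop : v ∈ clzOps
      · have hv0 : v ≠ '0' := by
          intro h; subst h; exact absurd hop (by decide)
        rw [if_pos hop]
        simp only [List.any_cons, ih []]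
        have hscan : ∀ b, clzScan b (v :: rest) = clzScan true rest := by
          intro b
          simp [clzScan, hv0, hop]
        match cur with
        | [] => simp [clzPred, hscan]
        | [c] =>
            by_cases h : c = '0'
            · subst h
              simp only [if_neg (by simp : (['0'] : List Char) ≠ [])]
              have : clzScan true ('0' :: v :: rest) = clzScan true rest := by
                simp [clzScan, hop, hv0, clzScan]
              simp [clzPred, this]
            · simp [clzPred, h, hscan, List.getD]
        | a :: b :: t =>
            have hne : (a :: b :: t) ≠ ['0'] := by simp
            simp only [if_neg (by simp : (a :: b :: t : List Char) ≠ []), if_neg hne]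
            by_cases hp : clzPred (a :: b :: t) = true
            · simp [hp]
            · have hp' : clzPred (a :: b :: t) = false := by simpa using hp
              simp [hp', hscan]
      · rw [if_neg hop]
        rw [ih (cur ++ [v])]
        match cur with
        | [] =>
            by_cases h : v = '0'
            · subst h
              simp [clzScan, hop]
            · have : ([v] : List Char) ≠ ['0'] := by simp [h]
              simp only [List.nil_append, if_neg (by simp : ([v] : List Char) ≠ []), if_neg this]
              have hp : clzPred [v] = false := by simp [clzPred]
              simp [hp, clzScan, h, hop]
        | [c] =>
            by_cases h : c = '0'
            · subst h
              have hp : clzPred ['0', v] = true := by simp [clzPred, List.getD]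
              simp only [if_neg (by simp : (['0'] : List Char) ≠ [])]
              have : ('0' :: [v] : List Char) ≠ ['0'] := by simp
              simp only [List.cons_append, List.nil_append,
                if_neg (by simp : ('0' :: [v] : List Char) ≠ []), if_neg this, hp]
              simp [clzScan, hop]
            · have h1 : ([c] : List Char) ≠ ['0'] := by simp [h]
              have h2 : (c :: [v] : List Char) ≠ ['0'] := by simp
              have hp1 : clzPred [c] = false := by simp [clzPred]
              have hp2 : clzPred (c :: [v]) = false := by simp [clzPred, List.getD, h]
              simp only [List.cons_append, List.nil_append,
                if_neg (by simp : ([c] : List Char) ≠ []), if_neg h1, hp1,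
                if_neg (by simp : (c :: [v] : List Char) ≠ []), if_neg h2, hp2]
              simp [clzScan, hop]
        | a :: b :: t =>
            have h1 : (a :: b :: t : List Char) ≠ ['0'] := by simp
            have h2 : (a :: b :: t ++ [v] : List Char) ≠ ['0'] := by simp
            have hp : clzPred (a :: b :: t ++ [v]) = clzPred (a :: b :: t) := by
              simp [clzPred, List.getD]
            simp only [List.cons_append] at hp
            by_cases hpa : clzPred (a :: b :: t) = true
            · simp [h1, hp, hpa]
            · have hpa' : clzPred (a :: b :: t) = false := by simpa using hpa
              simp [h1, hp, hpa', clzScan, hop]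

-- ===== VERDICT (by name: the statement is the Claim_ definition above) =====
theorem contains_leading_zeros_spec : Claim_equal_contains_leading_zeros := by
  intro func _
  unfold Spec_contains_leading_zeros contains_leading_zeros contains_leading_zeros_alt
  have hA := clzLoop_eq_scan func.toList []
  simp only [List.nil_append, List.length_nil] at hA
  rw [hA, clzTokens_any_eq_scan func.toList []]
  simp [clzStart]
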